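-- pv_equiv track=rewrite | github.com/oolongpanda/advent-of-code | adventofcode2022/day14.py | rockmodel
-- ===== SOURCE A (Python) =====
-- def rockmodel(input):
--     rocks = {}
--     maxpoint = 0
--     for line in input:
--         for p, point in enumerate(line[:-1]):
--             a = min(point, line[p + 1])
--             b = max(point, line[p + 1])
--             if b[1] > maxpoint:
--                 maxpoint = b[1]
--             for x in range(a[0], b[0] + 1):
--                 for y in range(a[1], b[1] + 1):
--                     if x in rocks:
--                         if y not in rocks[x]:
--                             rocks[x] += [y]
--                     else:
--                         rocks.update({x: [y]})
--     for rock in rocks: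
--         rocks[rock].sort()
--     return rocks, maxpoint + 2
-- ===== SOURCE B (Python) =====
-- def rockmodel(input):
--     cols = {}
--     maxpoint = 0
--     for line in input:
--         for p in range(len(line) - 1):
--             a = min(line[p], line[p + 1])
--             b = max(line[p], line[p + 1])
--             maxpoint = max(maxpoint, b[1])
--             if a[1] <= b[1]:
--                 for x in range(a[0], b[0] + 1):
--                     cols.setdefault(x, []).append((a[1], b[1]))
--     rocks = {}
--     for x, ivs in cols.items():
--         lo = min(iv[0] for iv in ivs)
--         hi = max(iv[1] for iv in ivs)
--         rocks[x] = [y for y in range(lo, hi + 1)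
--                     if any(l <= y <= h for l, h in ivs)]
--     return rocks, maxpoint + 2
-- ===== Notes on version B (the rewrite author's own statement) =====
-- stated objective: faster
-- what changed: A inserts every rock cell into the dict one by one with a per-cell membership scan of the column list and sorts each column at the end; B never stores cells: it records one (lo, hi) interval per column per segment and emits each column's y's in one pass over the column's bounding range with an interval-cover test, so the per-cell dedup scan and the final sort disappear.
import Mathlib
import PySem

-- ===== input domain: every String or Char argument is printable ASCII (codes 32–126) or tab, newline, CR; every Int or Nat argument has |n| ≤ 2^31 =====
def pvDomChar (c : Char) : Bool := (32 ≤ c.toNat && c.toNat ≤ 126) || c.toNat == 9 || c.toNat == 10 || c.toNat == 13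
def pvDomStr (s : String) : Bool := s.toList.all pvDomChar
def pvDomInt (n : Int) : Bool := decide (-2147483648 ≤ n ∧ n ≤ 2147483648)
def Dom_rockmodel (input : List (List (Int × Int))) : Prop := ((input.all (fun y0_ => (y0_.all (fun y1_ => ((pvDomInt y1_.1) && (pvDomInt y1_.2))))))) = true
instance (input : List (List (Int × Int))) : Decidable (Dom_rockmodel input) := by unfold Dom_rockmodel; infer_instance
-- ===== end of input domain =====

-- B drops A's per-cell dict insertion with membership tests and final sort entirely: it records one
-- (lo, hi) interval per column per segment and, per column, emits the covered y's by scanning the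
-- bounding range with an interval-cover test — same return value by a different algorithm.

-- ===== PORT A =====
-- Python's min/max of two int pairs (lexicographic; first argument kept on ties)
def pyMinPair (u v : Int × Int) : Int × Int :=
  if v.1 < u.1 ∨ (v.1 = u.1 ∧ v.2 < u.2) then v else u
def pyMaxPair (u v : Int × Int) : Int × Int :=
  if u.1 < v.1 ∨ (u.1 = v.1 ∧ u.2 < v.2) then v else u

-- the body of A's innermost loop: membership-tested append / fresh insert
def rockStepA (d : PySem.Dict Int (List Int)) (x y : Int) : PySem.Dict Int (List Int) :=
  if d.contains x then
    (if y ∈ d.getD x [] then d else d.modify x [] (fun v => v ++ [y]))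
  else d.insert x [y]

-- A's per-segment body: 'for p, point in enumerate(line[:-1])'
def segA (line : List (Int × Int)) (s : PySem.Dict Int (List Int) × Int)
    (pp : Int × (Int × Int)) : PySem.Dict Int (List Int) × Int :=
  let point := pp.2
  let nxt := PySem.List.pyGetD line (pp.1 + 1) (0, 0)
  let a := pyMinPair point nxt
  let b := pyMaxPair point nxt
  let mp := if b.2 > s.2 then b.2 else s.2
  let d := (PySem.List.pyRange a.1 (b.1 + 1) 1).foldl (fun d x =>
    (PySem.List.pyRange a.2 (b.2 + 1) 1).foldl (fun d y => rockStepA d x y) d) s.1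
  (d, mp)

def lineA (s : PySem.Dict Int (List Int) × Int) (line : List (Int × Int)) :
    PySem.Dict Int (List Int) × Int :=
  (PySem.List.enumerate (PySem.List.slice line none (some (-1)))).foldl (segA line) s

def rockmodel (input : List (List (Int × Int))) : (List (Int × List Int)) × Int :=
  let s := input.foldl lineA ((PySem.Dict.empty : PySem.Dict Int (List Int)), (0 : Int))
  (s.1.items.map (fun p => (p.1, PySem.List.sorted p.2 (fun y => y) false)), s.2 + 2)

-- ===== PORT B =====
-- B's per-segment body: 'for p in range(len(line) - 1)'; records one interval per touched column
-- (cols.setdefault(x, []).append((lo, hi)) is d[x] = d.get(x, []) + [(lo, hi)], i.e. Dict.modify)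
def segB (line : List (Int × Int)) (s : PySem.Dict Int (List (Int × Int)) × Int) (p : Int) :
    PySem.Dict Int (List (Int × Int)) × Int :=
  let a := pyMinPair (PySem.List.pyGetD line p (0, 0)) (PySem.List.pyGetD line (p + 1) (0, 0))
  let b := pyMaxPair (PySem.List.pyGetD line p (0, 0)) (PySem.List.pyGetD line (p + 1) (0, 0))
  let mp := max s.2 b.2
  let d := if a.2 ≤ b.2 then
      (PySem.List.pyRange a.1 (b.1 + 1) 1).foldl
        (fun d x => d.modify x [] (fun v => v ++ [(a.2, b.2)])) s.1
    else s.1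
  (d, mp)

def lineB (s : PySem.Dict Int (List (Int × Int)) × Int) (line : List (Int × Int)) :
    PySem.Dict Int (List (Int × Int)) × Int :=
  (PySem.List.pyRange 0 ((line.length : Int) - 1) 1).foldl (segB line) s

-- column expansion: scan the bounding range, keep the y's covered by some recorded interval
-- (the 0 defaults are unreachable: in rockmodel_alt every stored column has at least one interval,
-- matching the Python where min/max run on a non-empty generator)
def expandCol (ivs : List (Int × Int)) : List Int :=
  let lo := match ivs with | [] => 0 | i :: t => t.foldl (fun m p => min m p.1) i.1
  let hi := match ivs with | [] => 0 | i :: t => t.foldl (fun m p => max m p.2) i.2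
  (PySem.List.pyRange lo (hi + 1) 1).filter
    (fun y => ivs.any (fun p => decide (p.1 ≤ y) && decide (y ≤ p.2)))

def rockmodel_alt (input : List (List (Int × Int))) : (List (Int × List Int)) × Int :=
  let s := input.foldl lineB ((PySem.Dict.empty : PySem.Dict Int (List (Int × Int))), (0 : Int))
  (s.1.items.map (fun p => (p.1, expandCol p.2)), s.2 + 2)

-- ===== PRECONDITION & SPEC =====
def Spec_rockmodel (input : List (List (Int × Int))) (out : (List (Int × List Int)) × Int) : Prop := out = rockmodel_alt input
instance (input : List (List (Int × Int))) (out : (List (Int × List Int)) × Int) : Decidable (Spec_rockmodel input out) := by unfold Spec_rockmodel; infer_instance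

-- ===== CLAIM (what is proved, stated in full; the proofs are below) =====
def Claim_equal_rockmodel : Prop := ∀ (input : List (List (Int × Int))), Dom_rockmodel input → Spec_rockmodel input (rockmodel input)

-- ===== LEMMAS AND PROOFS =====

-- generic fold helpers -------------------------------------------------------
theorem foldl_pres {α β : Type} (P : α → Prop) (f : α → β → α) (l : List β)
    (h : ∀ a b, P a → P (f a b)) : ∀ a, P a → P (l.foldl f a) := by
  induction l with
  | nil => intro a ha; exact ha
  | cons b t ih => intro a ha; exact ih _ (h a b ha)

theorem foldl_congr_inv {α β : Type} (P : α → Prop) (f g : α → β → α) (l : List β)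
    (hfg : ∀ a b, P a → f a b = g a b) (hP : ∀ a b, P a → P (g a b)) :
    ∀ a, P a → l.foldl f a = l.foldl g a := by
  induction l with
  | nil => intro a _; rfl
  | cons b t ih =>
    intro a ha
    simp only [List.foldl_cons]
    rw [hfg a b ha]
    exact ih _ (hP a b ha)

-- the flat CELL collector mirroring A's loop structure -----------------------
def aFold (cs : List (Int × Int)) (d : PySem.Dict Int (List Int)) : PySem.Dict Int (List Int) :=
  cs.foldl (fun d c => rockStepA d c.1 c.2) d

def segC (line : List (Int × Int)) (s : List (Int × Int) × Int) (p : Int) :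
    List (Int × Int) × Int :=
  let a := pyMinPair (PySem.List.pyGetD line p (0, 0)) (PySem.List.pyGetD line (p + 1) (0, 0))
  let b := pyMaxPair (PySem.List.pyGetD line p (0, 0)) (PySem.List.pyGetD line (p + 1) (0, 0))
  let mp := if b.2 > s.2 then b.2 else s.2
  let cells := (PySem.List.pyRange a.1 (b.1 + 1) 1).foldl (fun cs x =>
    cs ++ (PySem.List.pyRange a.2 (b.2 + 1) 1).map (fun y => (x, y))) s.1
  (cells, mp)

def lineC (s : List (Int × Int) × Int) (line : List (Int × Int)) : List (Int × Int) × Int :=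
  (PySem.List.pyRange 0 ((line.length : Int) - 1) 1).foldl (segC line) s

theorem aFold_append (cs ds : List (Int × Int)) (d : PySem.Dict Int (List Int)) :
    aFold (cs ++ ds) d = aFold ds (aFold cs d) := List.foldl_append ..

theorem aFold_block (xs ys : List Int) (d : PySem.Dict Int (List Int)) :
    aFold (xs.flatMap (fun x => ys.map (fun y => (x, y)))) d
    = xs.foldl (fun d x => ys.foldl (fun d y => rockStepA d x y) d) d := by
  unfold aFold
  rw [List.foldl_flatMap]
  apply PySem.List.foldl_congr_mem
  intro d x _
  rw [List.foldl_map]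

theorem seg_step (line : List (Int × Int)) (k : Nat) (hk : k < line.length - 1)
    (cells : List (Int × Int)) (m : Int) :
    segA line (aFold cells PySem.Dict.empty, m) ((k : Int), line.dropLast.getD k (0, 0))
    = (aFold (segC line (cells, m) (k : Int)).1 PySem.Dict.empty,
       (segC line (cells, m) (k : Int)).2) := by
  have hlt : k < line.dropLast.length := by simp [List.length_dropLast]; omega
  have hlen : k < line.length := by omega
  have h1 : line.dropLast.getD k (0, 0) = PySem.List.pyGetD line (k : Int) (0, 0) := by
    rw [PySem.List.pyGetD_natCast, List.getD_eq_getElem _ _ hlt, List.getD_eq_getElem _ _ hlen,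
      List.getElem_dropLast]
  unfold segA segC
  simp only [h1]
  rw [PySem.List.foldl_append_eq_flatMap, aFold_append, aFold_block]

theorem enum_eq (xs : List (Int × Int)) (s : Int) :
    PySem.List.enumerate xs s
    = (List.range xs.length).map (fun (k : Nat) => (s + (k : Int), xs.getD k (0, 0))) := by
  induction xs generalizing s with
  | nil => simp [PySem.List.enumerate_nil]
  | cons x t ih =>
    rw [PySem.List.enumerate_cons, ih, List.length_cons, List.range_succ_eq_map]
    simp only [List.map_cons, List.map_map, Function.comp_def, List.getD_cons_zero,
      List.getD_cons_succ, Nat.cast_zero, add_zero, Nat.cast_succ]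
    congr 1
    apply List.map_congr_left; intro k _
    have : s + 1 + (k : Int) = s + ((k : Int) + 1) := by ring
    rw [this]

theorem range_fold (line : List (Int × Int)) (l : List Nat)
    (hl : ∀ k ∈ l, k < line.length - 1) :
    ∀ (cells : List (Int × Int)) (m : Int),
    l.foldl (fun s (k : Nat) => segA line s ((k : Int), line.dropLast.getD k (0, 0)))
        (aFold cells PySem.Dict.empty, m)
    = (aFold (l.foldl (fun s (k : Nat) => segC line s (k : Int)) (cells, m)).1 PySem.Dict.empty,
       (l.foldl (fun s (k : Nat) => segC line s (k : Int)) (cells, m)).2) := by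
  induction l with
  | nil => intro cells m; rfl
  | cons k t ih =>
    intro cells m
    simp only [List.foldl_cons]
    rw [seg_step line k (hl k (List.mem_cons_self)) cells m]
    have := ih (fun j hj => hl j (List.mem_cons_of_mem _ hj))
      (segC line (cells, m) (k : Int)).1 (segC line (cells, m) (k : Int)).2
    simpa using this

theorem line_eq (line cells : List (Int × Int)) (m : Int) :
    lineA (aFold cells PySem.Dict.empty, m) line
    = (aFold (lineC (cells, m) line).1 PySem.Dict.empty, (lineC (cells, m) line).2) := by
  unfold lineA lineC
  rw [PySem.List.slice_to_neg_one, enum_eq, PySem.List.pyRange_one]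
  have hn : ((line.length : Int) - 1 - 0).toNat = line.dropLast.length := by
    rw [List.length_dropLast]; omega
  rw [hn, List.foldl_map, List.foldl_map]
  simp only [zero_add]
  exact range_fold line (List.range line.dropLast.length) (fun k hk => by
    have := List.mem_range.1 hk
    rw [List.length_dropLast] at this
    omega) cells m

theorem fold_eqA (input : List (List (Int × Int))) : ∀ (cells : List (Int × Int)) (m : Int),
    input.foldl lineA (aFold cells PySem.Dict.empty, m)
    = (aFold (input.foldl lineC (cells, m)).1 PySem.Dict.empty,
       (input.foldl lineC (cells, m)).2) := by
  induction input with
  | nil => intro cells m; rfl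
  | cons line t ih =>
    intro cells m
    simp only [List.foldl_cons]
    rw [line_eq]
    have := ih (lineC (cells, m) line).1 (lineC (cells, m) line).2
    simpa using this

-- the flat EVENT collector mirroring B's loop structure -----------------------
def evStep (d : PySem.Dict Int (List (Int × Int))) (p : Int × (Int × Int)) :
    PySem.Dict Int (List (Int × Int)) :=
  d.modify p.1 [] (fun v => v ++ [p.2])

def eFold (es : List (Int × (Int × Int))) (d : PySem.Dict Int (List (Int × Int))) :
    PySem.Dict Int (List (Int × Int)) :=
  es.foldl evStep d

def segE (line : List (Int × Int)) (s : List (Int × (Int × Int)) × Int) (p : Int) :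
    List (Int × (Int × Int)) × Int :=
  let a := pyMinPair (PySem.List.pyGetD line p (0, 0)) (PySem.List.pyGetD line (p + 1) (0, 0))
  let b := pyMaxPair (PySem.List.pyGetD line p (0, 0)) (PySem.List.pyGetD line (p + 1) (0, 0))
  let mp := max s.2 b.2
  (if a.2 ≤ b.2 then
      s.1 ++ (PySem.List.pyRange a.1 (b.1 + 1) 1).map (fun x => (x, (a.2, b.2)))
    else s.1, mp)

def lineE (s : List (Int × (Int × Int)) × Int) (line : List (Int × Int)) :
    List (Int × (Int × Int)) × Int :=
  (PySem.List.pyRange 0 ((line.length : Int) - 1) 1).foldl (segE line) s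

theorem segB_step (line : List (Int × Int)) (es : List (Int × (Int × Int))) (m p : Int) :
    segB line (eFold es PySem.Dict.empty, m) p
    = (eFold (segE line (es, m) p).1 PySem.Dict.empty, (segE line (es, m) p).2) := by
  unfold segB segE
  simp only
  split_ifs with h
  · refine Prod.ext ?_ rfl
    simp only [eFold, List.foldl_append, List.foldl_map]
    rfl
  · rfl

theorem rangeB_fold (line : List (Int × Int)) (l : List Int) :
    ∀ (es : List (Int × (Int × Int))) (m : Int),
    l.foldl (segB line) (eFold es PySem.Dict.empty, m)
    = (eFold (l.foldl (segE line) (es, m)).1 PySem.Dict.empty,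
       (l.foldl (segE line) (es, m)).2) := by
  induction l with
  | nil => intro es m; rfl
  | cons p t ih =>
    intro es m
    simp only [List.foldl_cons]
    rw [segB_step]
    have := ih (segE line (es, m) p).1 (segE line (es, m) p).2
    simpa using this

theorem fold_eqB (input : List (List (Int × Int))) : ∀ (es : List (Int × (Int × Int))) (m : Int),
    input.foldl lineB (eFold es PySem.Dict.empty, m)
    = (eFold (input.foldl lineE (es, m)).1 PySem.Dict.empty,
       (input.foldl lineE (es, m)).2) := by
  induction input with
  | nil => intro es m; rfl
  | cons line t ih =>
    intro es m
    simp only [List.foldl_cons]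
    rw [lineB, rangeB_fold, ← lineE]
    have := ih (lineE (es, m) line).1 (lineE (es, m) line).2
    simpa using this

-- relating the two collectors -------------------------------------------------
def evCells (e : Int × (Int × Int)) : List (Int × Int) :=
  (PySem.List.pyRange e.2.1 (e.2.2 + 1) 1).map (fun y => (e.1, y))

theorem segCE (line : List (Int × Int)) (es : List (Int × (Int × Int))) (m p : Int) :
    segC line (es.flatMap evCells, m) p
    = ((segE line (es, m) p).1.flatMap evCells, (segE line (es, m) p).2) := by
  unfold segC segE
  simp only
  refine Prod.ext ?_ ?_
  · dsimp only
    rw [PySem.List.foldl_append_eq_flatMap]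
    split_ifs with h
    · rw [List.flatMap_append, List.flatMap_map]
      rfl
    · have hr : PySem.List.pyRange
          (pyMinPair (PySem.List.pyGetD line p (0, 0)) (PySem.List.pyGetD line (p + 1) (0, 0))).2
          ((pyMaxPair (PySem.List.pyGetD line p (0, 0)) (PySem.List.pyGetD line (p + 1) (0, 0))).2 + 1) 1
          = [] := by
        rw [PySem.List.pyRange_one]
        have h0 : ((pyMaxPair (PySem.List.pyGetD line p (0, 0)) (PySem.List.pyGetD line (p + 1) (0, 0))).2 + 1
            - (pyMinPair (PySem.List.pyGetD line p (0, 0)) (PySem.List.pyGetD line (p + 1) (0, 0))).2).toNat = 0 := by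
          omega
        rw [h0]
        rfl
      simp [hr]
  · dsimp only
    rw [max_def]
    split_ifs <;> omega

theorem lineCE (line : List (Int × Int)) (l : List Int) :
    ∀ (es : List (Int × (Int × Int))) (m : Int),
    l.foldl (segC line) (es.flatMap evCells, m)
    = ((l.foldl (segE line) (es, m)).1.flatMap evCells, (l.foldl (segE line) (es, m)).2) := by
  induction l with
  | nil => intro es m; rfl
  | cons p t ih =>
    intro es m
    simp only [List.foldl_cons]
    rw [segCE]
    have := ih (segE line (es, m) p).1 (segE line (es, m) p).2
    simpa using this

theorem fold_eqCE (input : List (List (Int × Int))) :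
    ∀ (es : List (Int × (Int × Int))) (m : Int),
    input.foldl lineC (es.flatMap evCells, m)
    = ((input.foldl lineE (es, m)).1.flatMap evCells, (input.foldl lineE (es, m)).2) := by
  induction input with
  | nil => intro es m; rfl
  | cons line t ih =>
    intro es m
    simp only [List.foldl_cons]
    rw [lineC, lineE, lineCE]
    have := ih (lineE (es, m) line).1 (lineE (es, m) line).2
    simpa [lineE] using this

-- every recorded event is a non-empty interval
def evOK (es : List (Int × (Int × Int))) : Prop := ∀ e ∈ es, e.2.1 ≤ e.2.2

theorem segE_OK (line : List (Int × Int)) (s : List (Int × (Int × Int)) × Int) (p : Int)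
    (h : evOK s.1) : evOK (segE line s p).1 := by
  unfold segE
  dsimp only
  split_ifs with hg
  · intro e he
    rcases List.mem_append.1 he with he | he
    · exact h e he
    · rcases List.mem_map.1 he with ⟨x, -, rfl⟩
      exact hg
  · exact h

theorem evOK_fold (input : List (List (Int × Int))) (es : List (Int × (Int × Int))) (m : Int)
    (h : evOK es) : evOK (input.foldl lineE (es, m)).1 := by
  refine foldl_pres (fun s => evOK s.1) lineE input ?_ (es, m) h
  intro s line hs
  exact foldl_pres (fun s => evOK s.1) (segE line) _ (fun a b ha => segE_OK line a b ha) s hs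

-- dict characterisations ------------------------------------------------------
def dedupSnoc (y : Int) (v : List Int) : List Int := if y ∈ v then v else v ++ [y]

theorem insert_getD_self (d : PySem.Dict Int (List Int)) (x : Int)
    (hc : d.contains x = true) (hnd : d.keys.Nodup) : d.insert x (d.getD x []) = d := by
  apply PySem.Dict.ext
  rw [PySem.Dict.items_insert_of_contains d _ hc]
  conv_rhs => rw [← List.map_id d.items]
  apply List.map_congr_left
  intro p hp
  by_cases hpx : (p.1 == x) = true
  · have hx : p.1 = x := by simpa using hpx
    have hmem : (x, p.2) ∈ d.items := by rw [← hx]; exact hp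
    have hgd := PySem.Dict.getD_of_mem_items d hmem hnd []
    simp only [hpx, if_pos, id_eq]
    rw [hgd, ← hx]
  · simp [hpx]

theorem rockStepA_eq_modify (d : PySem.Dict Int (List Int)) (x y : Int)
    (h : d.keys.Nodup) : rockStepA d x y = d.modify x [] (dedupSnoc y) := by
  unfold rockStepA
  by_cases hc : d.contains x = true
  · rw [if_pos hc]
    by_cases hy : y ∈ d.getD x []
    · rw [if_pos hy]
      show d = d.insert x (dedupSnoc y (d.getD x []))
      rw [dedupSnoc, if_pos hy, insert_getD_self d x hc h]
    · rw [if_neg hy]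
      show d.insert x (d.getD x [] ++ [y]) = d.insert x (dedupSnoc y (d.getD x []))
      rw [dedupSnoc, if_neg hy]
  · rw [if_neg hc]
    have hc' : d.contains x = false := by simpa using hc
    show d.insert x [y] = d.insert x (dedupSnoc y (d.getD x []))
    rw [PySem.Dict.getD_of_not_contains d [] hc']
    rfl

theorem aFold_eq_modify (cs : List (Int × Int)) (d : PySem.Dict Int (List Int))
    (h : d.keys.Nodup) :
    aFold cs d = cs.foldl (fun d c => d.modify c.1 [] (dedupSnoc c.2)) d := by
  refine foldl_congr_inv (fun d => d.keys.Nodup)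
    (fun d c => rockStepA d c.1 c.2) (fun d c => d.modify c.1 [] (dedupSnoc c.2)) cs
    ?_ ?_ d h
  · intro a b ha
    exact rockStepA_eq_modify a b.1 b.2 ha
  · intro a b ha
    exact PySem.Dict.nodup_keys_insert a b.1 _ ha

theorem getD_foldl_modify_g {β : Type} (g : β → List Int → List Int) (l : List (Int × β)) :
    ∀ (d : PySem.Dict Int (List Int)) (c : Int),
    (l.foldl (fun d p => d.modify p.1 [] (g p.2)) d).getD c []
    = (l.filter (fun p => p.1 == c)).foldl (fun v p => g p.2 v) (d.getD c []) := by
  induction l with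
  | nil => intro d c; rfl
  | cons p t ih =>
    intro d c
    simp only [List.foldl_cons, List.filter_cons]
    by_cases hp : p.1 = c
    · have hb : (p.1 == c) = true := by simpa using hp
      rw [hb, if_pos rfl, List.foldl_cons, ih]
      congr 1
      rw [PySem.Dict.getD_modify, if_pos hp.symm, hp]
    · have hb : (p.1 == c) = false := by simpa using hp
      rw [hb, if_neg (by simp), ih]
      rw [PySem.Dict.getD_modify, if_neg (fun hh => hp hh.symm)]

-- column-level lemma ----------------------------------------------------------
def addAll (v : List Int) (ys : List Int) : List Int := ys.foldl (fun v y => dedupSnoc y v) v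

def colFold (es : List (Int × (Int × Int))) (v : List Int) : List Int :=
  es.foldl (fun v e => addAll v (PySem.List.pyRange e.2.1 (e.2.2 + 1) 1)) v

theorem mem_dedupSnoc (z : Int) (v : List Int) (y : Int) :
    y ∈ dedupSnoc z v ↔ y ∈ v ∨ y = z := by
  unfold dedupSnoc
  split_ifs with h
  · constructor
    · exact fun hy => Or.inl hy
    · rintro (hy | rfl)
      · exact hy
      · exact h
  · simp

theorem nodup_dedupSnoc (z : Int) (v : List Int) (h : v.Nodup) : (dedupSnoc z v).Nodup := by
  unfold dedupSnoc
  split_ifs with hz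
  · exact h
  · rw [← List.concat_eq_append]
    exact (List.nodup_concat v z).2 ⟨hz, h⟩

theorem mem_addAll (ys : List Int) : ∀ (v : List Int) (y : Int),
    y ∈ addAll v ys ↔ y ∈ v ∨ y ∈ ys := by
  induction ys with
  | nil => intro v y; simp [addAll]
  | cons z t ih =>
    intro v y
    have hstep : addAll v (z :: t) = addAll (dedupSnoc z v) t := rfl
    rw [hstep, ih, mem_dedupSnoc]
    simp only [List.mem_cons]
    tauto

theorem nodup_addAll (ys : List Int) : ∀ (v : List Int), v.Nodup → (addAll v ys).Nodup := by
  induction ys with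
  | nil => intro v h; exact h
  | cons z t ih =>
    intro v h
    exact ih _ (nodup_dedupSnoc z v h)

theorem colFold_nodup (es : List (Int × (Int × Int))) : ∀ (v : List Int),
    v.Nodup → (colFold es v).Nodup := by
  induction es with
  | nil => intro v h; exact h
  | cons e t ih => intro v h; exact ih _ (nodup_addAll _ v h)

theorem mem_colFold (es : List (Int × (Int × Int))) : ∀ (v : List Int) (y : Int),
    y ∈ colFold es v ↔ y ∈ v ∨ ∃ e ∈ es, e.2.1 ≤ y ∧ y ≤ e.2.2 := by
  induction es with
  | nil => intro v y; simp [colFold]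
  | cons e t ih =>
    intro v y
    have hstep : colFold (e :: t) v
        = colFold t (addAll v (PySem.List.pyRange e.2.1 (e.2.2 + 1) 1)) := rfl
    rw [hstep, ih, mem_addAll]
    have hr : y ∈ PySem.List.pyRange e.2.1 (e.2.2 + 1) 1 ↔ e.2.1 ≤ y ∧ y ≤ e.2.2 := by
      rw [PySem.List.mem_pyRange_one]
      omega
    rw [hr, List.exists_mem_cons_iff]
    tauto

theorem pairwise_pyRange (a b : Int) : (PySem.List.pyRange a b 1).Pairwise (· < ·) := by
  rw [PySem.List.pyRange_one]
  rw [List.pairwise_map]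
  exact List.pairwise_lt_range.imp (fun h => by omega)

theorem foldl_min_le (t : List (Int × Int)) : ∀ (m : Int),
    t.foldl (fun m p => min m p.1) m ≤ m
      ∧ ∀ p ∈ t, t.foldl (fun m p => min m p.1) m ≤ p.1 := by
  induction t with
  | nil => intro m; exact ⟨le_refl m, by simp⟩
  | cons q r ih =>
    intro m
    obtain ⟨h1, h2⟩ := ih (min m q.1)
    refine ⟨h1.trans (min_le_left ..), ?_⟩
    intro p hp
    rcases List.mem_cons.1 hp with rfl | hp
    · exact h1.trans (min_le_right ..)
    · exact h2 p hp

theorem foldl_max_ge (t : List (Int × Int)) : ∀ (m : Int),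
    m ≤ t.foldl (fun m p => max m p.2) m
      ∧ ∀ p ∈ t, p.2 ≤ t.foldl (fun m p => max m p.2) m := by
  induction t with
  | nil => intro m; exact ⟨le_refl m, by simp⟩
  | cons q r ih =>
    intro m
    obtain ⟨h1, h2⟩ := ih (max m q.2)
    refine ⟨(le_max_left ..).trans h1, ?_⟩
    intro p hp
    rcases List.mem_cons.1 hp with rfl | hp
    · exact (le_max_right ..).trans h1
    · exact h2 p hp

theorem mem_expandCol (ivs : List (Int × Int)) (y : Int) :
    y ∈ expandCol ivs ↔ ∃ iv ∈ ivs, iv.1 ≤ y ∧ y ≤ iv.2 := by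
  cases ivs with
  | nil => simp [expandCol]
  | cons i t =>
    unfold expandCol
    dsimp only
    rw [List.mem_filter, PySem.List.mem_pyRange_one, List.any_eq_true]
    constructor
    · rintro ⟨-, iv, hiv, hb⟩
      exact ⟨iv, hiv, by simpa using hb⟩
    · rintro ⟨iv, hiv, h1, h2⟩
      obtain ⟨ha1, ha2⟩ := foldl_min_le t i.1
      obtain ⟨hb1, hb2⟩ := foldl_max_ge t i.2
      have hlo : t.foldl (fun m p => min m p.1) i.1 ≤ iv.1 := by
        rcases List.mem_cons.1 hiv with rfl | h
        · exact ha1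
        · exact ha2 iv h
      have hhi : iv.2 ≤ t.foldl (fun m p => max m p.2) i.2 := by
        rcases List.mem_cons.1 hiv with rfl | h
        · exact hb1
        · exact hb2 iv h
      refine ⟨⟨by omega, by omega⟩, iv, hiv, by simpa using ⟨h1, h2⟩⟩

theorem pairwise_expandCol (ivs : List (Int × Int)) :
    (expandCol ivs).Pairwise (· < ·) := by
  unfold expandCol
  exact List.Pairwise.filter _ (pairwise_pyRange _ _)

theorem col_eq (es : List (Int × (Int × Int))) :
    PySem.List.sorted (colFold es []) (fun y => y) false
    = expandCol (es.map (fun e => e.2)) := by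
  have hnd : (colFold es []).Nodup := colFold_nodup es [] List.nodup_nil
  have hpw := pairwise_expandCol (es.map (fun e => e.2))
  have hnd2 : (expandCol (es.map (fun e => e.2))).Nodup := hpw.imp (fun h => ne_of_lt h)
  apply PySem.List.sorted_id_eq_of_perm_of_pairwise
  · rw [List.perm_ext_iff_of_nodup hnd2 hnd]
    intro y
    rw [mem_expandCol, mem_colFold es [] y]
    simp only [List.not_mem_nil, false_or]
    constructor
    · rintro ⟨iv, hiv, h⟩
      rcases List.mem_map.1 hiv with ⟨e, he, rfl⟩
      exact ⟨e, he, h⟩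
    · rintro ⟨e, he, h⟩
      exact ⟨e.2, List.mem_map.2 ⟨e, he, rfl⟩, h⟩
  · exact hpw.imp (fun h => le_of_lt h)

-- keys of the two dicts --------------------------------------------------------
theorem filter_flatMap_ev (E : List (Int × (Int × Int))) (c : Int) :
    (E.flatMap evCells).filter (fun p => p.1 == c)
    = (E.filter (fun e => e.1 == c)).flatMap evCells := by
  induction E with
  | nil => rfl
  | cons e t ih =>
    rw [List.flatMap_cons, List.filter_append, ih, List.filter_cons]
    by_cases h : e.1 = c
    · have hb : (e.1 == c) = true := by simpa using h
      rw [hb, if_pos rfl, List.flatMap_cons]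
      congr 1
      apply List.filter_eq_self.2
      intro p hp
      rcases List.mem_map.1 hp with ⟨y, -, rfl⟩
      simpa using h
    · have hb : (e.1 == c) = false := by simpa using h
      rw [hb, if_neg (by simp)]
      have hz : (evCells e).filter (fun p => p.1 == c) = [] := by
        apply List.filter_eq_nil_iff.2
        intro p hp
        rcases List.mem_map.1 hp with ⟨y, -, rfl⟩
        simpa using h
      rw [hz, List.nil_append]

theorem update_of_all_mem (xs : List Int) : ∀ (s : PySem.Set Int),
    (∀ x ∈ xs, x ∈ s) → PySem.Set.update s xs = s := by
  induction xs with
  | nil => intro s _; rfl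
  | cons x t ih =>
    intro s h
    rw [PySem.Set.update_cons, PySem.Set.add_of_mem (h x List.mem_cons_self)]
    exact ih s (fun z hz => h z (List.mem_cons_of_mem _ hz))

theorem update_flat (E : List (Int × (Int × Int))) : evOK E → ∀ (s : PySem.Set Int),
    PySem.Set.update s ((E.flatMap evCells).map (fun c => c.1))
    = PySem.Set.update s (E.map (fun e => e.1)) := by
  induction E with
  | nil => intro _ s; rfl
  | cons e t ih =>
    intro hOK s
    rw [List.flatMap_cons, List.map_append, PySem.Set.update_append, List.map_cons,
      PySem.Set.update_cons]
    have hcell : PySem.Set.update s ((evCells e).map (fun c => c.1)) = PySem.Set.add s e.1 := by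
      have hle : e.2.1 ≤ e.2.2 := hOK e List.mem_cons_self
      unfold evCells
      rw [List.map_map]
      rw [PySem.List.pyRange_one_cons (by omega : e.2.1 < e.2.2 + 1), List.map_cons,
        PySem.Set.update_cons]
      apply update_of_all_mem
      intro x hx
      rcases List.mem_map.1 hx with ⟨y, -, rfl⟩
      exact (PySem.Set.mem_add s e.1 _).2 (Or.inr rfl)
    rw [hcell]
    exact ih (fun z hz => hOK z (List.mem_cons_of_mem _ hz)) (PySem.Set.add s e.1)

-- ===== VERDICT (by name: the statement is the Claim_ definition above) =====
theorem rockmodel_spec : Claim_equal_rockmodel := by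
  intro input _
  show rockmodel input = rockmodel_alt input
  unfold rockmodel rockmodel_alt
  rw [show ((PySem.Dict.empty : PySem.Dict Int (List Int)), (0 : Int))
      = (aFold [] PySem.Dict.empty, (0 : Int)) from rfl,
    show ((PySem.Dict.empty : PySem.Dict Int (List (Int × Int))), (0 : Int))
      = (eFold [] PySem.Dict.empty, (0 : Int)) from rfl,
    fold_eqA input [] 0, fold_eqB input [] 0]
  have hCE : input.foldl lineC ([], 0)
      = ((input.foldl lineE ([], 0)).1.flatMap evCells, (input.foldl lineE ([], 0)).2) :=
    fold_eqCE input [] 0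
  rw [hCE]
  set E := (input.foldl lineE ([], 0)).1 with hE
  have hOK : evOK E := evOK_fold input [] 0 (by intro e he; cases he)
  have hnd0 : (PySem.Dict.empty : PySem.Dict Int (List Int)).keys.Nodup := by
    rw [PySem.Dict.keys_empty]; exact List.nodup_nil
  dsimp only
  rw [aFold_eq_modify _ _ hnd0]
  refine Prod.ext ?_ rfl
  dsimp only
  have hKA : ((E.flatMap evCells).foldl
        (fun d c => d.modify c.1 [] (dedupSnoc c.2)) PySem.Dict.empty).keys
      = PySem.Set.update [] ((E.flatMap evCells).map (fun c => c.1)) := by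
    have := PySem.Dict.keys_foldl_modify_key (E.flatMap evCells)
      (fun c : Int × Int => c.1) [] (fun _ c => dedupSnoc c.2) PySem.Dict.empty
    simpa [PySem.Dict.keys_empty] using this
  have hKB : (eFold E PySem.Dict.empty).keys
      = PySem.Set.update [] (E.map (fun e => e.1)) := by
    have := PySem.Dict.keys_foldl_modify_key E
      (fun e : Int × (Int × Int) => e.1) [] (fun _ e => fun v => v ++ [e.2]) PySem.Dict.empty
    simpa [PySem.Dict.keys_empty] using this
  have hndA : ((E.flatMap evCells).foldl
      (fun d c => d.modify c.1 [] (dedupSnoc c.2)) PySem.Dict.empty).keys.Nodup := by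
    rw [hKA, PySem.Set.update_nil_left]
    exact PySem.Set.nodup_ofList _
  have hndB : (eFold E PySem.Dict.empty).keys.Nodup := by
    rw [hKB, PySem.Set.update_nil_left]
    exact PySem.Set.nodup_ofList _
  rw [PySem.Dict.items_eq_map_keys _ hndA [], PySem.Dict.items_eq_map_keys _ hndB [],
    List.map_map, List.map_map, hKA, hKB, update_flat E hOK]
  apply List.map_congr_left
  intro k _
  simp only [Function.comp]
  have hgB : (eFold E PySem.Dict.empty).getD k [] = (E.filter (fun e => e.1 == k)).map (fun e => e.2) := by
    have := PySem.Dict.getD_foldl_modify_append E PySem.Dict.empty k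
    simpa [PySem.Dict.getD_empty] using this
  have hgA : ((E.flatMap evCells).foldl
        (fun d c => d.modify c.1 [] (dedupSnoc c.2)) PySem.Dict.empty).getD k []
      = colFold (E.filter (fun e => e.1 == k)) [] := by
    rw [getD_foldl_modify_g dedupSnoc (E.flatMap evCells) PySem.Dict.empty k,
      PySem.Dict.getD_empty, filter_flatMap_ev E k, List.foldl_flatMap]
    unfold colFold addAll
    congr 1
    funext v e
    unfold evCells
    rw [List.foldl_map]
  rw [hgA, hgB, col_eq]
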